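-- pv_equiv track=rewrite | github.com/ziggiz-courier/ziggiz-courier-handler-core | ziggiz_courier_handler_core/decoders/utils/message/leef_1_parser.py | _process_escapes
-- ===== SOURCE A (Python) =====
-- def _process_escapes(value: str) -> str:
--     r"""
--     Process escape sequences in LEEF values.
--
--     LEEF escape sequences include:
--     - \= for equals sign
--     - \| for pipe
--     - \\ for backslash
--     - \n for newline
--     - \r for carriage return
--     - \t for tab
--
--     Args:
--         value: The value string to process
--
--     Returns:
--         String with escape sequences resolved
--     """
--     i = 0
--     result = ""
--
--     while i < len(value):
--         if value[i] == "\\" and i + 1 < len(value):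
--             # Handle escape sequences
--             if value[i + 1] == "\\":
--                 result += "\\"
--             elif value[i + 1] == "=":
--                 result += "="
--             elif value[i + 1] == "|":
--                 result += "|"
--             elif value[i + 1] == "n":
--                 result += "\n"
--             elif value[i + 1] == "r":
--                 result += "\r"
--             elif value[i + 1] == "t":
--                 result += "\t"
--             else:
--                 # Unknown escape sequence, keep as is
--                 result += value[i + 1]
--             i += 2
--         else:
--             result += value[i]
--             i += 1
--
--     return result
-- ===== SOURCE B (Python) =====
-- _T = {"\\": "\\", "=": "=", "|": "|", "n": "\n", "r": "\r", "t": "\t"}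
--
--
-- def _process_escapes(value: str) -> str:
--     # Staged approach: split the string on backslashes, then stitch the pieces
--     # back together; each split boundary marks one escape to resolve.
--     pieces = value.split("\\")
--     out = [pieces[0]]
--     i = 1
--     while i < len(pieces):
--         p = pieces[i]
--         if p:
--             # boundary backslash escaped this piece's first character
--             out.append(_T.get(p[0], p[0]) + p[1:])
--             i += 1
--         elif i + 1 < len(pieces):
--             # empty piece between two backslashes: "\\" escape, next piece literal
--             out.append("\\" + pieces[i + 1])
--             i += 2
--         else:
--             # trailing lone backslash
--             out.append("\\")
--             i += 1
--     return "".join(out)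
-- ===== Notes on version B (the rewrite author's own statement) =====
-- stated objective: faster
-- what changed: Replaces A's character-by-character index scan with repeated string += by a staged algorithm: first split the string on backslashes (str.split), then stitch the pieces back together once, resolving at each split boundary the escape formed by the boundary backslash and the next piece's first character (empty pieces encode \\ and a trailing lone backslash).
import Mathlib
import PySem

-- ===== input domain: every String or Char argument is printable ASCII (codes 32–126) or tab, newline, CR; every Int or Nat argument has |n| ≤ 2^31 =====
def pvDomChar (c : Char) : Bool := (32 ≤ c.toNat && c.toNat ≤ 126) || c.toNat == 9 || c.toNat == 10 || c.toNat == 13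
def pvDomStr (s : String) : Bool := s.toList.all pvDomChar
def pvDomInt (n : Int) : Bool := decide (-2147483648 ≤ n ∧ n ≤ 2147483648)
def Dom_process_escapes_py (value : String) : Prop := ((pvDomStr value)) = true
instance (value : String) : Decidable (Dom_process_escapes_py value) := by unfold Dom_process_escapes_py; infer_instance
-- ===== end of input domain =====

-- B replaces A's character-by-character index scan with a staged algorithm:
-- split on backslashes, then stitch the pieces back together, resolving at each
-- split boundary the escape the boundary backslash forms (objective: faster, measured).

-- ===== PORT A =====
-- A's while loop over string indices, result accumulated by concatenation.
def pvLoopA (s : List Char) (i : Nat) (result : List Char) : List Char :=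
  if _h : i < s.length then
    if s.getD i ' ' = '\\' ∧ i + 1 < s.length then
      let c := s.getD (i + 1) ' '
      let r :=
        if c = '\\' then result ++ ['\\']
        else if c = '=' then result ++ ['=']
        else if c = '|' then result ++ ['|']
        else if c = 'n' then result ++ ['\n']
        else if c = 'r' then result ++ ['\r']
        else if c = 't' then result ++ ['\t']
        else result ++ [c]
      pvLoopA s (i + 2) r
    else
      pvLoopA s (i + 1) (result ++ [s.getD i ' '])
  else result
termination_by s.length - i
decreasing_by all_goals omega

def process_escapes_py (value : String) : String :=
  String.ofList (pvLoopA value.toList 0 [])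

-- ===== PORT B =====
-- Source B's escape-table dict literal _T
def pvEscTable : PySem.Dict Char Char :=
  PySem.Dict.ofList [('\\', '\\'), ('=', '='), ('|', '|'), ('n', '\n'), ('r', '\r'), ('t', '\t')]

-- _T.get(c, c)
def pvEsc (c : Char) : Char := PySem.Dict.getD pvEscTable c c

-- Source B's while loop over pieces[1:]: a nonempty piece has its first char resolved;
-- an empty piece followed by another piece is an escaped backslash (that next piece
-- stays literal); a trailing empty piece is a lone trailing backslash.
def pvStitch : List (List Char) → List Char
  | [] => []
  | (c :: cs) :: rest => (pvEsc c :: cs) ++ pvStitch rest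
  | [[]] => ['\\']
  | [] :: q :: rest => ('\\' :: q) ++ pvStitch rest

-- value.split("\\") → List.splitOn '\\'; pieces[0] is emitted literally.
-- (split never returns an empty list; the [] arm only makes the match total)
def process_escapes_py_alt (value : String) : String :=
  match value.toList.splitOn '\\' with
  | [] => ""
  | p :: rest => String.ofList (p ++ pvStitch rest)

-- ===== PRECONDITION & SPEC =====
def Spec_process_escapes_py (value : String) (out : String) : Prop := out = process_escapes_py_alt value
instance (value : String) (out : String) : Decidable (Spec_process_escapes_py value out) := by unfold Spec_process_escapes_py; infer_instance

-- ===== CLAIM (what is proved, stated in full; the proofs are below) =====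
def Claim_equal_process_escapes_py : Prop := ∀ (value : String), Dom_process_escapes_py value → Spec_process_escapes_py value (process_escapes_py value)

-- ===== LEMMAS AND PROOFS =====

-- proof-side reference function: the direct one-pass escape resolution
def pvGoB : List Char → List Char
  | [] => []
  | c :: rest =>
    if c = '\\' then
      match rest with
      | [] => ['\\']
      | n :: rest' => pvEsc n :: pvGoB rest'
    else c :: pvGoB rest

-- A's if/elif chain resolves each escaped char exactly as the table lookup does
lemma escChain_eq_pvEsc (c : Char) :
    (if c = '\\' then '\\'
     else if c = '=' then '='
     else if c = '|' then '|'
     else if c = 'n' then '\n'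
     else if c = 'r' then '\r'
     else if c = 't' then '\t'
     else c) = pvEsc c := by
  by_cases h1 : c = '\\'
  · subst h1; rfl
  by_cases h2 : c = '='
  · subst h2; rfl
  by_cases h3 : c = '|'
  · subst h3; rfl
  by_cases h4 : c = 'n'
  · subst h4; rfl
  by_cases h5 : c = 'r'
  · subst h5; rfl
  by_cases h6 : c = 't'
  · subst h6; rfl
  have e1 : ('\\' == c) = false := by simpa using Ne.symm h1
  have e2 : ('=' == c) = false := by simpa using Ne.symm h2
  have e3 : ('|' == c) = false := by simpa using Ne.symm h3
  have e4 : ('n' == c) = false := by simpa using Ne.symm h4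
  have e5 : ('r' == c) = false := by simpa using Ne.symm h5
  have e6 : ('t' == c) = false := by simpa using Ne.symm h6
  simp [pvEsc, pvEscTable, PySem.Dict.ofList, PySem.Dict.update, PySem.Dict.getD, PySem.Dict.get?,
    PySem.Dict.insert, PySem.Dict.empty, List.find?, h1, h2, h3, h4, h5, h6,
    e1, e2, e3, e4, e5, e6]

lemma pvGoB_cons_ne (c : Char) (rest : List Char) (h : ¬ c = '\\') :
    pvGoB (c :: rest) = c :: pvGoB rest := by
  rw [pvGoB.eq_def]
  simp [h]

lemma pvGoB_cons_cons (n : Char) (rest : List Char) :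
    pvGoB ('\\' :: n :: rest) = pvEsc n :: pvGoB rest := by
  rw [pvGoB.eq_def]
  simp

-- A's branch-wise appends collapse to one append of the table lookup
lemma chainApp (result : List Char) (c : Char) :
    (if c = '\\' then result ++ ['\\']
     else if c = '=' then result ++ ['=']
     else if c = '|' then result ++ ['|']
     else if c = 'n' then result ++ ['\n']
     else if c = 'r' then result ++ ['\r']
     else if c = 't' then result ++ ['\t']
     else result ++ [c]) = result ++ [pvEsc c] := by
  rw [← escChain_eq_pvEsc]
  split_ifs <;> rfl

-- loop invariant: A's loop from index i appends the resolution of the remaining suffix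
lemma loopA_eq (s : List Char) (i : Nat) (result : List Char) :
    pvLoopA s i result = result ++ pvGoB (s.drop i) := by
  induction i, result using pvLoopA.induct (s := s) with
  | case1 i result h hc c r ih =>
    obtain ⟨hb, h1⟩ := hc
    rw [pvLoopA]
    simp only [h, hb, h1, and_self, dite_true, if_true]
    simp only [c, r] at ih
    simp only [dite_eq_ite] at ih ⊢
    rw [chainApp] at ih
    rw [chainApp, ih, List.drop_eq_getElem_cons h, List.drop_eq_getElem_cons h1]
    have hg : s[i] = '\\' := by rwa [List.getD_eq_getElem s ' ' h] at hb
    have hc2 : s.getD (i+1) ' ' = s[i+1] := List.getD_eq_getElem s ' ' h1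
    rw [hg, hc2, pvGoB_cons_cons, List.append_assoc]
    rfl
  | case2 i result h hc ih =>
    rw [pvLoopA]
    simp only [h, hc, dite_true, if_false]
    have hg : s.getD i ' ' = s[i] := List.getD_eq_getElem s ' ' h
    rw [ih, List.drop_eq_getElem_cons h]
    by_cases hb : s[i] = '\\'
    · -- lone trailing backslash: i+1 = length, the suffix after it is empty
      have h1 : ¬ i + 1 < s.length := by
        intro hlt; exact hc ⟨by rw [hg, hb], hlt⟩
      have hd : s.drop (i + 1) = [] := List.drop_eq_nil_of_le (by omega)
      rw [hg, hb, hd, List.append_assoc]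
      rfl
    · rw [hg, pvGoB_cons_ne _ _ hb, List.append_assoc]
      rfl
  | case3 i result h =>
    rw [pvLoopA]
    simp only [h, dite_false]
    rw [List.drop_eq_nil_of_le (by omega)]
    simp [pvGoB]

-- head-plus-stitch of the split pieces, as a single function on the piece list
def pvStitchAll (ps : List (List Char)) : List Char :=
  match ps with
  | [] => []
  | p :: rest => p ++ pvStitch rest

-- splitOnP never returns the empty list: expose its head and tail
lemma splitOnP_exists (l : List Char) :
    ∃ p rest', l.splitOnP (· == '\\') = p :: rest' := by
  rcases hsp : l.splitOnP (· == '\\') with _ | ⟨p, rest'⟩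
  · exact absurd hsp (List.splitOnP_ne_nil _ _)
  · exact ⟨p, rest', rfl⟩

-- B's split-then-stitch equals the direct one-pass resolution
lemma stitch_splitOnP (l : List Char) :
    pvStitchAll (l.splitOnP (· == '\\')) = pvGoB l := by
  induction l using pvGoB.induct with
  | case1 => rfl
  | case2 => rfl
  | case3 n rest' ih =>
    obtain ⟨p, r', hpr⟩ := splitOnP_exists rest'
    by_cases hd : n = '\\'
    · subst hd
      rw [List.splitOnP_cons, List.splitOnP_cons]
      simp only [beq_self_eq_true, if_true]
      rw [hpr, pvGoB_cons_cons, ← ih, hpr]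
      have hesc : pvEsc '\\' = '\\' := by decide
      simp [pvStitchAll, pvStitch, hesc]
    · rw [List.splitOnP_cons, List.splitOnP_cons]
      have hbd : (n == '\\') = false := by simpa using hd
      simp only [beq_self_eq_true, if_true, hbd, Bool.false_eq_true, if_false]
      rw [hpr, pvGoB_cons_cons, ← ih, hpr]
      simp [pvStitchAll, pvStitch, List.modifyHead]
  | case4 c rest hb ih =>
    rw [List.splitOnP_cons]
    have hbc : (c == '\\') = false := by simpa using hb
    simp only [hbc, Bool.false_eq_true, if_false]
    rw [pvGoB_cons_ne _ _ hb, ← ih]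
    obtain ⟨p, rest', hpr⟩ := splitOnP_exists rest
    rw [hpr]
    simp [pvStitchAll, List.modifyHead]

-- ===== VERDICT (by name: the statement is the Claim_ definition above) =====
theorem process_escapes_py_spec : Claim_equal_process_escapes_py := by
  intro value _
  unfold Spec_process_escapes_py process_escapes_py process_escapes_py_alt
  rw [loopA_eq, List.drop_zero, List.nil_append, ← stitch_splitOnP]
  have : value.toList.splitOn '\\' = value.toList.splitOnP (· == '\\') := rfl
  rw [this]
  cases h : value.toList.splitOnP (· == '\\') with
  | nil => exact absurd h (List.splitOnP_ne_nil _ _)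
  | cons p rest => simp [pvStitchAll]
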